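-- pv_equiv track=rewrite | github.com/austin-leung/112-Mahjong | logic.py | winningCombo
-- ===== SOURCE A (Python) =====
-- def isPong(lst):
-- 	if len(lst) != 3: # pong is 3 elements
-- 		return False
-- 	# all elements must be the same
-- 	elif lst[0] == lst[1] and lst[1] == lst[2]:
-- 		return True
-- 	return False
--
-- def isChow(lst):
-- 	if len(lst) != 3:
-- 		return False
-- 	sortedTiles = sorted(lst)
-- 	typeTiles = []
-- 	numTiles = []
-- 	for i in range(3):
-- 		filename = sortedTiles[i]
-- 		# first element being a digit indicates it is a dot, bamboo, or character
-- 		if filename[0] not in "0123456789":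
-- 			return False
-- 		typeTiles.append(filename[1:]) # should be "dot", "bamboo", or "character"
-- 		numTiles.append(filename[0:1]) # should be 1, 2, 3, ... , 9
-- 	# check if same type (e.g. "dot", "dot", "dot")
-- 	if typeTiles[0] != typeTiles[1] or typeTiles[1] != typeTiles[2]:
-- 		return False
-- 	# check if consecutive run (e.g. 4, 5, 6)
-- 	if int(numTiles[0]) + 1 != int(numTiles[1]) or int(numTiles[1]) + 1 != int(numTiles[2]):
-- 		return False
-- 	return True
--
-- def powerset(tileLst):
--     # returns a list of all subsets of the list a
--     if (len(tileLst) == 0):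
--         return [[]]
--     else:
--         allSubsets = [ ]
--         for subset in powerset(tileLst[1:]):
--             allSubsets += [subset]
--             allSubsets += [[tileLst[0]] + subset]
--         return allSubsets
--
-- def threePowerset(tileLst):
--  	psets = powerset(tileLst)
--  	threeLst = []
--  	for lst in psets:
--  		if len(lst) == 3:
--  			threeLst.append(lst)
--  	return threeLst
--
-- def winningCombo(tileLst, winCombo = None):
-- 	if winCombo == None:
-- 		winCombo = []
-- 	# final combo should always be a winning pair, not a meld
-- 	if len(tileLst) == 2 and tileLst[0] == tileLst[1]:
-- 		return winCombo + tileLst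
-- 	else:
-- 		for threeSet in threePowerset(tileLst):
-- 			if isPong(threeSet) or isChow(threeSet):
-- 				newWinCombo = winCombo + threeSet
-- 				newTileLst = tileLst[:]
-- 				for tile in threeSet:
-- 					newTileLst.remove(tile)
-- 				tmp = winningCombo(newTileLst, newWinCombo)
-- 				if tmp != None:
-- 					return tmp
-- 	return None
-- ===== SOURCE B (Python) =====
-- def isMeld(t):
--     a, b, c = sorted(t)
--     if a == b == c:
--         return True
--     for s in (a, b, c):
--         if not s[:1].isdigit():
--             return False
--     return (a[1:] == b[1:] == c[1:]
--             and int(a[0]) + 1 == int(b[0]) and int(b[0]) + 1 == int(c[0]))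
--
-- def orderedTriples(tileLst):
--     # one left-to-right pass accumulating sub-lists of sizes 1, 2 and 3;
--     # produces exactly the 3-element subsets in A's powerset order, in O(n^3)
--     singles, pairs, triples = [], [], []
--     for y in tileLst:
--         triples += [p + [y] for p in pairs]
--         pairs += [[s, y] for s in singles]
--         singles.append(y)
--     return triples
--
-- def winningCombo(tileLst, winCombo=None):
--     if winCombo is None:
--         winCombo = []
--     if len(tileLst) == 2 and tileLst[0] == tileLst[1]:
--         return winCombo + tileLst
--     for threeSet in orderedTriples(tileLst):
--         if isMeld(threeSet):
--             rest = tileLst[:]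
--             for tile in threeSet:
--                 rest.remove(tile)
--             res = winningCombo(rest, winCombo + threeSet)
--             if res is not None:
--                 return res
--     return None
-- ===== Notes on version B (the rewrite author's own statement) =====
-- stated objective: faster
-- what changed: Each recursion level enumerates the candidate 3-tile subsets directly with a single O(n^3) accumulation pass (building the size-1/2/3 sublists in one sweep, in the same order A produces them) instead of materialising and filtering the full 2^n powerset, and folds the pong/chow test into one sorted-triple check; intended as faster per level (measured 59.65x at the largest size both finished; the backtracking search itself can still be slow on large no-win hands).
import Mathlib
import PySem

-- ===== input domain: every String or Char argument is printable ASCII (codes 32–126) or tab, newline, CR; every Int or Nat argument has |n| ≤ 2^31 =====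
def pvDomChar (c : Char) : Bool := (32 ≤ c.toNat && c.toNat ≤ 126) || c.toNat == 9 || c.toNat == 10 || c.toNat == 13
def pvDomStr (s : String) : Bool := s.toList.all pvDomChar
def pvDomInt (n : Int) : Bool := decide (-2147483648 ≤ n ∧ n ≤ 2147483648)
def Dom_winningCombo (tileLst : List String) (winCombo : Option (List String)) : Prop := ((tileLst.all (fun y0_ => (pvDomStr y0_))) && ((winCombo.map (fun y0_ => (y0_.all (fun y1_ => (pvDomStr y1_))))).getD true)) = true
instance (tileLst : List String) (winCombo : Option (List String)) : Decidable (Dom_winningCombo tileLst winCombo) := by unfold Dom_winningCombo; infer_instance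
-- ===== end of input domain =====

-- B replaces A's per-level powerset filtering by a single accumulation pass that produces
-- the 3-element subsets directly (same order); intended as faster per level (measured 59.65x
-- at the largest size both finished); return-value equivalence only.

-- ===== PORT A =====
def isPong (lst : List String) : Bool :=
  if lst.length != 3 then false
  else if lst.getD 0 "" == lst.getD 1 "" && lst.getD 1 "" == lst.getD 2 "" then true
  else false

-- the 'for i in range(3)' loop of isChow; strings are handled on .toList (exact per PySem).
-- 'none' = the loop left isChow: either the early 'return False' (first char not a digit)
-- or the IndexError of filename[0] on an empty tile (the latter is excluded by Pre_).
def chowLoop : List Nat → List String → List (List Char) → List (List Char) →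
    Option (List (List Char) × List (List Char))
  | [], _, typeTiles, numTiles => some (typeTiles, numTiles)
  | i :: rest, sortedTiles, typeTiles, numTiles =>
    match (sortedTiles.getD i "").toList with
    | [] => none
    | c :: cs =>
      if !("0123456789".toList.contains c) then none
      else chowLoop rest sortedTiles (typeTiles ++ [cs]) (numTiles ++ [[c]])

def isChow (lst : List String) : Bool :=
  if lst.length != 3 then false
  else
    match chowLoop [0, 1, 2] (PySem.List.sorted lst (fun s => s) false) [] [] with
    | none => false
    | some (typeTiles, numTiles) =>
      if typeTiles.getD 0 [] != typeTiles.getD 1 [] || typeTiles.getD 1 [] != typeTiles.getD 2 [] then false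
      else if (PySem.Int.ofChars? (numTiles.getD 0 [])).getD 0 + 1 != (PySem.Int.ofChars? (numTiles.getD 1 [])).getD 0
           || (PySem.Int.ofChars? (numTiles.getD 1 [])).getD 0 + 1 != (PySem.Int.ofChars? (numTiles.getD 2 [])).getD 0 then false
      else true

def powersetA : List String → List (List String)
  | [] => [[]]
  | x :: rest => (powersetA rest).foldl (fun allSubsets subset => allSubsets ++ [subset] ++ [[x] ++ subset]) []

def threePowersetA (tileLst : List String) : List (List String) :=
  (powersetA tileLst).foldl (fun threeLst lst => if lst.length == 3 then threeLst ++ [lst] else threeLst) []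

-- the 'for tile in threeSet: newTileLst.remove(tile)' loop (remove never raises: threeSet ⊆ tileLst)
def removeTilesA (tileLst threeSet : List String) : List String :=
  threeSet.foldl (fun acc tile => (PySem.List.remove? acc tile).getD acc) tileLst

-- the 'for threeSet in threePowerset(tileLst)' loop; 'recur' is the recursive call
def wcLoopA (recur : List String → List String → Option (List String))
    (tileLst winCombo : List String) : List (List String) → Option (List String)
  | [] => none
  | threeSet :: rest =>
    if isPong threeSet || isChow threeSet then
      match recur (removeTilesA tileLst threeSet) (winCombo ++ threeSet) with
      | some tmp => some tmp
      | none => wcLoopA recur tileLst winCombo rest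
    else wcLoopA recur tileLst winCombo rest

def winningComboFuel : Nat → List String → List String → Option (List String)
  | 0, _, _ => none   -- fuel guard only: each recursive call removes 3 tiles, length+1 fuel suffices
  | fuel + 1, tileLst, winCombo =>
    if tileLst.length == 2 && tileLst.getD 0 "" == tileLst.getD 1 "" then
      some (winCombo ++ tileLst)
    else
      wcLoopA (winningComboFuel fuel) tileLst winCombo (threePowersetA tileLst)

def winningCombo (tileLst : List String) (winCombo : Option (List String)) : Option (List String) :=
  winningComboFuel (tileLst.length + 1) tileLst
    (match winCombo with | none => [] | some wc => wc)

-- ===== PORT B =====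
def digitPrefix (s : String) : Bool := PySem.Chars.strIsdigit (s.toList.take 1)   -- s[:1].isdigit()
def digitVal (s : String) : Int := (PySem.Int.ofChars? (s.toList.take 1)).getD 0  -- int(s[0]); only used on s with a digit first char
def tailChars (s : String) : List Char := s.toList.drop 1                         -- s[1:]

def isMeld (t : List String) : Bool :=
  match PySem.List.sorted t (fun s => s) false with    -- a, b, c = sorted(t)
  | [a, b, c] =>
    if a == b && b == c then true
    else if !digitPrefix a then false
    else if !digitPrefix b then false
    else if !digitPrefix c then false
    else tailChars a == tailChars b && tailChars b == tailChars c
      && digitVal a + 1 == digitVal b && digitVal b + 1 == digitVal c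
  | _ => false   -- tuple unpacking would raise for ≠ 3 tiles; never reached (all triples have 3)

-- one pass accumulating the size-1, size-2 and size-3 sub-lists
def orderedTriples (tileLst : List String) : List (List String) :=
  (tileLst.foldl
    (fun (st : List String × List (List String) × List (List String)) y =>
      (st.1 ++ [y],
       st.2.1 ++ st.1.map (fun s => [s, y]),
       st.2.2 ++ st.2.1.map (fun p => p ++ [y])))
    ([], [], [])).2.2

def removeTilesB (tileLst threeSet : List String) : List String :=
  threeSet.foldl (fun rest tile => (PySem.List.remove? rest tile).getD rest) tileLst

def wcLoopB (recur : List String → List String → Option (List String))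
    (tileLst winCombo : List String) : List (List String) → Option (List String)
  | [] => none
  | threeSet :: rest =>
    if isMeld threeSet then
      match recur (removeTilesB tileLst threeSet) (winCombo ++ threeSet) with
      | some res => some res
      | none => wcLoopB recur tileLst winCombo rest
    else wcLoopB recur tileLst winCombo rest

def winningComboAltFuel : Nat → List String → List String → Option (List String)
  | 0, _, _ => none   -- fuel guard only, as in port A
  | fuel + 1, tileLst, winCombo =>
    if tileLst.length == 2 && tileLst.getD 0 "" == tileLst.getD 1 "" then
      some (winCombo ++ tileLst)
    else
      wcLoopB (winningComboAltFuel fuel) tileLst winCombo (orderedTriples tileLst)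

def winningCombo_alt (tileLst : List String) (winCombo : Option (List String)) : Option (List String) :=
  winningComboAltFuel (tileLst.length + 1) tileLst
    (match winCombo with | none => [] | some wc => wc)

-- ===== PRECONDITION & SPEC =====
-- Pre_ excludes hands of three or more tiles containing an empty-string tile: on those A's
-- isChow can evaluate ""[0] and raise IndexError (on some of them A still returns, when a
-- winning decomposition is found before any non-pong triple containing "" is tested — see cites).
def Pre_winningCombo (tileLst : List String) (winCombo : Option (List String)) : Prop :=
  tileLst.length ≤ 2 ∨ "" ∉ tileLst
instance (tileLst : List String) (winCombo : Option (List String)) : Decidable (Pre_winningCombo tileLst winCombo) := by unfold Pre_winningCombo; infer_instance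

def pvWitness_winningCombo : List String × Option (List String) := (["1dot", "2dot", "3dot", "9dot", "9dot"], none)

def Spec_winningCombo (tileLst : List String) (winCombo : Option (List String)) (out : Option (List String)) : Prop := out = winningCombo_alt tileLst winCombo
instance (tileLst : List String) (winCombo : Option (List String)) (out : Option (List String)) : Decidable (Spec_winningCombo tileLst winCombo out) := by unfold Spec_winningCombo; infer_instance

-- ===== CLAIM (what is proved, stated in full; the proofs are below) =====
def Claim_equal_winningCombo : Prop := ∀ (tileLst : List String) (winCombo : Option (List String)), Dom_winningCombo tileLst winCombo → Pre_winningCombo tileLst winCombo → Spec_winningCombo tileLst winCombo (winningCombo tileLst winCombo)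

-- ===== LEMMAS AND PROOFS =====

-- membership in the digit string literal is exactly the isdigit test
lemma digit_contains (c : Char) : ("0123456789".toList.contains c) = PySem.Chars.isdigit c := by
  have h : "0123456789".toList = ['0','1','2','3','4','5','6','7','8','9'] := by decide
  rw [h]
  simp only [List.contains_cons, List.contains_nil, Bool.or_false]
  rw [Bool.eq_iff_iff]
  simp only [Bool.or_eq_true, beq_iff_eq, Bool.and_eq_true, decide_eq_true_eq, Char.le_def,
    Char.ext_iff, PySem.Chars.isdigit]
  constructor
  · rintro (h|h|h|h|h|h|h|h|h|h) <;> rw [h] <;> exact ⟨by decide, by decide⟩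
  · rintro ⟨h1, h2⟩
    have n1 : 48 ≤ c.val.toNat := UInt32.le_iff_toNat_le.mp h1
    have n2 : c.val.toNat ≤ 57 := UInt32.le_iff_toNat_le.mp h2
    have hu : ∀ (u : UInt32), u.toNat = c.val.toNat → c.val = u := by
      intro u hue; exact (UInt32.toNat_inj.mp hue.symm)
    interval_cases hm : c.val.toNat <;>
      first
        | exact Or.inl (hu _ rfl)
        | exact Or.inr (Or.inl (hu _ rfl))
        | exact Or.inr (Or.inr (Or.inl (hu _ rfl)))
        | exact Or.inr (Or.inr (Or.inr (Or.inl (hu _ rfl))))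
        | exact Or.inr (Or.inr (Or.inr (Or.inr (Or.inl (hu _ rfl)))))
        | exact Or.inr (Or.inr (Or.inr (Or.inr (Or.inr (Or.inl (hu _ rfl))))))
        | exact Or.inr (Or.inr (Or.inr (Or.inr (Or.inr (Or.inr (Or.inl (hu _ rfl)))))))
        | exact Or.inr (Or.inr (Or.inr (Or.inr (Or.inr (Or.inr (Or.inr (Or.inl (hu _ rfl))))))))
        | exact Or.inr (Or.inr (Or.inr (Or.inr (Or.inr (Or.inr (Or.inr (Or.inr (Or.inl (hu _ rfl)))))))))
        | exact Or.inr (Or.inr (Or.inr (Or.inr (Or.inr (Or.inr (Or.inr (Or.inr (Or.inr (hu _ rfl)))))))))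


-- all three equal is transported along a permutation of three-element lists
lemma perm3_all_eq {a b c x : String} (hp : List.Perm [a, b, c] [x, x, x]) :
    a = x ∧ b = x ∧ c = x := by
  have ha : a ∈ [x, x, x] := hp.mem_iff.mp (by simp)
  have hb : b ∈ [x, x, x] := hp.mem_iff.mp (by simp)
  have hc : c ∈ [x, x, x] := hp.mem_iff.mp (by simp)
  simp only [List.mem_cons, List.not_mem_nil, or_false, or_self] at ha hb hc
  exact ⟨ha, hb, hc⟩

lemma pair_beq_false {x y z : String} (hp : ¬(x = y ∧ y = z)) : (x == y && y == z) = false := by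
  by_cases h1 : x = y <;> by_cases h2 : y = z <;> simp_all

lemma meld_eq (t : List String) : (isPong t || isChow t) = isMeld t := by
  rcases hs : PySem.List.sorted t (fun s => s) false with _ | ⟨a, _ | ⟨b, _ | ⟨c, _ | ⟨d, l⟩⟩⟩⟩
  all_goals have hl := PySem.List.length_sorted t (fun s => s) false
  all_goals rw [hs] at hl
  case nil | cons.nil | cons.cons.nil | cons.cons.cons.cons =>
    simp only [List.length] at hl
    have h3 : t.length ≠ 3 := by omega
    simp [isPong, isChow, isMeld, hs, h3]
  case cons.cons.cons.nil =>
    simp only [List.length] at hl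
    obtain ⟨x, y, z, ht⟩ := List.length_eq_three.mp (by omega : t.length = 3)
    subst ht
    have hperm : List.Perm [a, b, c] [x, y, z] := hs ▸ PySem.List.sorted_perm [x, y, z] (fun s => s) false
    by_cases hp : x = y ∧ y = z
    · obtain ⟨h1, h2⟩ := hp; subst h1; subst h2
      obtain ⟨e1, e2, e3⟩ := perm3_all_eq hperm
      subst e1; subst e2; subst e3
      simp [isPong, isMeld, hs]
    · have hpong : isPong [x, y, z] = false := by
        simp [isPong, pair_beq_false hp]
      have habc : (a == b && b == c) = false := by
        by_contra hne
        obtain ⟨e1, e2⟩ : a = b ∧ b = c := by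
          have := Bool.not_eq_false _ |>.mp hne
          simpa using this
        subst e1; subst e2
        obtain ⟨f1, f2, f3⟩ := perm3_all_eq hperm.symm
        exact hp ⟨f1.trans f2.symm, f2.trans f3.symm⟩
      rw [hpong, Bool.false_or]
      simp only [isMeld, hs, habc, Bool.false_eq_true, if_false]
      simp only [isChow, List.length, show ((3:Nat) != 3) = false by decide, Bool.false_eq_true,
        if_false, hs]
      rcases ha : a.toList with _ | ⟨a0, as⟩
      · simp [chowLoop, ha, digitPrefix, PySem.Chars.strIsdigit]
      · have hda : digitPrefix a = ("0123456789".toList.contains a0) := by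
          rw [digit_contains]; simp [digitPrefix, ha, PySem.Chars.strIsdigit]
        simp only [chowLoop, List.getD, List.getElem?_cons_zero, List.getElem?_cons_succ,
          Option.getD_some, ha]
        rcases hA : "0123456789".toList.contains a0 with _|_
        · simp only [hda, hA, Bool.not_false, if_true]
        · rcases hb : b.toList with _ | ⟨b0, bs⟩
          · have hpb : digitPrefix b = false := by
              simp [digitPrefix, hb, PySem.Chars.strIsdigit]
            simp only [hda, hA, hpb, Bool.not_true, Bool.not_false, Bool.false_eq_true,
              if_false, if_true]
          · have hdb : digitPrefix b = ("0123456789".toList.contains b0) := by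
              rw [digit_contains]; simp [digitPrefix, hb, PySem.Chars.strIsdigit]
            rcases hB : "0123456789".toList.contains b0 with _|_
            · simp only [hda, hA, hdb, hB, Bool.not_true, Bool.not_false, Bool.false_eq_true,
                if_false, if_true]
            · rcases hc : c.toList with _ | ⟨c0, cs⟩
              · have hpc : digitPrefix c = false := by
                  simp [digitPrefix, hc, PySem.Chars.strIsdigit]
                simp only [hda, hA, hdb, hB, hpc, Bool.not_true, Bool.not_false,
                  Bool.false_eq_true, if_false, if_true]
              · have hdc : digitPrefix c = ("0123456789".toList.contains c0) := by
                  rw [digit_contains]; simp [digitPrefix, hc, PySem.Chars.strIsdigit]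
                rcases hC : "0123456789".toList.contains c0 with _|_
                · simp only [hda, hA, hdb, hB, hdc, hC, Bool.not_true, Bool.not_false,
                    Bool.false_eq_true, if_false, if_true]
                · simp only [hda, hA, hdb, hB, hdc, hC, Bool.not_true,
                    Bool.false_eq_true, if_false, List.nil_append, List.cons_append,
                    List.getElem?_cons_zero, List.getElem?_cons_succ, Option.getD_some]
                  simp only [tailChars, digitVal, ha, hb, hc, List.drop_succ_cons, List.drop_zero,
                    List.take_succ_cons, List.take_zero]
                  by_cases e1 : as = bs <;> by_cases e2 : bs = cs <;>
                    by_cases e3 : (PySem.Int.ofChars? [a0]).getD 0 + 1 = (PySem.Int.ofChars? [b0]).getD 0 <;>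
                    by_cases e4 : (PySem.Int.ofChars? [b0]).getD 0 + 1 = (PySem.Int.ofChars? [c0]).getD 0 <;>
                    (simp [e1, e2, e3, e4]; try (rw [Bool.eq_iff_iff]; simp))

def filt (k : Nat) (p : List String) : List (List String) :=
  (powersetA p).filter (fun s => s.length == k)

lemma powersetA_flat (x : String) (L : List (List String)) :
    L.foldl (fun acc s => acc ++ [s] ++ [[x] ++ s]) [] = L.flatMap (fun s => [s, x :: s]) := by
  have h := PySem.List.foldl_append_eq_flatMap (fun s : List String => [s, x :: s]) L []
  rw [List.nil_append] at h
  rw [← h]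
  apply PySem.List.foldl_congr_mem
  intro acc s _
  simp

lemma powersetA_snoc (r : List String) (y : String) :
    powersetA (r ++ [y]) = powersetA r ++ (powersetA r).map (· ++ [y]) := by
  induction r with
  | nil => simp [powersetA]
  | cons x r' ih =>
    show powersetA (x :: (r' ++ [y])) = powersetA (x :: r') ++ _
    simp only [powersetA, powersetA_flat, ih]
    rw [List.flatMap_append, List.flatMap_map, List.map_flatMap]
    congr 1

lemma filt_snoc (k : Nat) (r : List String) (y : String) :
    filt (k + 1) (r ++ [y]) = filt (k + 1) r ++ (filt k r).map (· ++ [y]) := by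
  unfold filt
  rw [powersetA_snoc, List.filter_append, List.filter_map]
  congr 1
  congr 1
  apply List.filter_congr
  intro s _
  simp [Function.comp]

lemma filt_zero (p : List String) : filt 0 p = [[]] := by
  induction p using List.reverseRecOn with
  | nil => rfl
  | append_singleton p y ih =>
    unfold filt at ih ⊢
    rw [powersetA_snoc, List.filter_append, List.filter_map]
    have h : List.filter ((fun s : List String => s.length == 0) ∘ (· ++ [y])) (powersetA p) = [] := by
      apply List.filter_eq_nil_iff.mpr
      intro s _
      simp [Function.comp]
    rw [h, ih]
    simp

lemma filt_one (p : List String) : filt 1 p = p.map (fun s => [s]) := by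
  induction p using List.reverseRecOn with
  | nil => rfl
  | append_singleton p y ih =>
    rw [filt_snoc, ih, filt_zero]
    simp

lemma filt2_snoc (p : List String) (y : String) :
    filt 2 (p ++ [y]) = filt 2 p ++ p.map (fun s => [s, y]) := by
  rw [show (2:Nat) = 1 + 1 from rfl, filt_snoc, filt_one]
  simp

lemma filt3_snoc (p : List String) (y : String) :
    filt 3 (p ++ [y]) = filt 3 p ++ (filt 2 p).map (· ++ [y]) := by
  rw [show (3:Nat) = 2 + 1 from rfl, filt_snoc]

lemma triples_inv (l p : List String) :
    l.foldl
      (fun (st : List String × List (List String) × List (List String)) y =>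
        (st.1 ++ [y],
         st.2.1 ++ st.1.map (fun s => [s, y]),
         st.2.2 ++ st.2.1.map (fun q => q ++ [y])))
      (p, filt 2 p, filt 3 p)
    = (p ++ l, filt 2 (p ++ l), filt 3 (p ++ l)) := by
  induction l generalizing p with
  | nil => simp
  | cons y l' ih =>
    rw [List.foldl_cons]
    have hstep : (p ++ [y], filt 2 p ++ p.map (fun s => [s, y]),
        filt 3 p ++ (filt 2 p).map (fun q => q ++ [y]))
        = (p ++ [y], filt 2 (p ++ [y]), filt 3 (p ++ [y])) := by
      rw [filt2_snoc, filt3_snoc]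
    show List.foldl _ (p ++ [y], filt 2 p ++ p.map (fun s => [s, y]),
        filt 3 p ++ (filt 2 p).map (fun q => q ++ [y])) l' = _
    rw [hstep, ih, List.append_assoc]
    rfl

lemma triples_eq (l : List String) : threePowersetA l = orderedTriples l := by
  unfold threePowersetA orderedTriples
  rw [PySem.List.foldl_append_if_eq_filter (fun s : List String => s.length == 3) (powersetA l) []]
  have h0 : (([], [], []) : List String × List (List String) × List (List String))
      = ([], filt 2 [], filt 3 []) := rfl
  rw [h0, triples_inv]
  simp [filt]

lemma removeTiles_eq (l t : List String) : removeTilesA l t = removeTilesB l t := rfl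

lemma wcLoop_eq (f g : List String → List String → Option (List String))
    (hfg : ∀ l wc, f l wc = g l wc) (cands : List (List String)) (l wc : List String) :
    wcLoopA f l wc cands = wcLoopB g l wc cands := by
  induction cands with
  | nil => rfl
  | cons t rest ih =>
    simp only [wcLoopA, wcLoopB, meld_eq, removeTiles_eq, hfg]
    by_cases hm : isMeld t
    · simp only [hm, if_true]
      cases g (removeTilesB l t) (wc ++ t) <;> simp [ih]
    · simp only [hm, ih]

lemma fuel_eq (fuel : Nat) (l wc : List String) :
    winningComboFuel fuel l wc = winningComboAltFuel fuel l wc := by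
  induction fuel generalizing l wc with
  | zero => rfl
  | succ n ih =>
    simp only [winningComboFuel, winningComboAltFuel, triples_eq]
    split
    · rfl
    · exact wcLoop_eq _ _ ih _ _ _

-- ===== VERDICT (by name: the statement is the Claim_ definition above) =====
theorem winningCombo_spec : Claim_equal_winningCombo := by
  intro tileLst winCombo _ _
  unfold Spec_winningCombo winningCombo winningCombo_alt
  exact fuel_eq _ _ _
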